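-- pv_equiv track=rewrite | github.com/doubleduck98/uni | si/pracownia1/zad5.py | opt_dist
-- ===== SOURCE A (Python) =====
-- def opt_dist(list, D):
--     # tablica sum prefiksowych
--     pref = [0 for _ in range(len(list) + 1)]
--     for i in range(1, len(list) + 1):
--         pref[i] = pref[i-1] + list[i-1]
--
--     res = len(list)
--     # przechodzimy po kolei okienkiem długości D
--     for i in range(len(list) - D + 1):
--         end = i + D - 1
--         curr = pref[end+1] - pref[i]
--         before = pref[i]
--         after = pref[len(list)] - pref[end+1]
--         res = min(res, D - curr + before + after)
--     return res
-- ===== SOURCE B (Python) =====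
-- def opt_dist(list, D):
--     # sliding window instead of a prefix-sum table; same result via D + total - 2*curr
--     n = len(list)
--     total = sum(list)
--     res = n
--     if D <= n:
--         curr = sum(list[:D])
--         res = min(res, D + total - 2 * curr)
--         for i in range(1, n - D + 1):
--             curr += list[i + D - 1] - list[i - 1]
--             res = min(res, D + total - 2 * curr)
--     return res
-- ===== Notes on version B (the rewrite author's own statement) =====
-- stated objective: simpler
-- what changed: B replaces A's prefix-sum table (a first pass building an O(n) list, then four indexed lookups per window) by a single sliding-window pass that maintains the current window sum incrementally and uses the simplified score D + total - 2*curr; the constant-factor win comes from dropping the table construction and per-window indexing.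
import Mathlib
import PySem

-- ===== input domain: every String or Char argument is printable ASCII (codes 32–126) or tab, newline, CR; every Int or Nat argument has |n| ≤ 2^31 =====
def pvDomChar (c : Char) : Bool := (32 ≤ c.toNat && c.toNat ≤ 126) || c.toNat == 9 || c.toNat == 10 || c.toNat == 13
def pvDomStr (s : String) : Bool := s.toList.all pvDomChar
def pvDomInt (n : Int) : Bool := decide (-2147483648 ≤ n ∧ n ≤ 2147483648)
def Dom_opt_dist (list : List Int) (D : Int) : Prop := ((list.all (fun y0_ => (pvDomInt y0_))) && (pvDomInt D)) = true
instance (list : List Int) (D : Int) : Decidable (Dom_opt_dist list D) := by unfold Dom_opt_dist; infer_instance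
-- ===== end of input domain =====

-- B replaces A's prefix-sum table by a sliding-window pass with O(1) extra space (simpler); equivalence is on D ≥ 0 (A raises IndexError for D < 0).

-- ===== PORT A =====
-- Literal port of A.  For D < 0 Python indexes pref out of range and raises IndexError;
-- those inputs are excluded by Pre_opt_dist, so the pyGetD defaults below are never the value used.
def opt_dist (list : List Int) (D : Int) : Int :=
  let n : Int := (list.length : Int)
  -- pref = [0 for _ in range(len(list) + 1)]
  let pref0 : List Int := (PySem.List.pyRange 0 (n + 1) 1).map (fun _ => (0 : Int))
  -- for i in range(1, len(list) + 1): pref[i] = pref[i-1] + list[i-1]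
  let pref : List Int := (PySem.List.pyRange 1 (n + 1) 1).foldl
      (fun pref i =>
        pref.set i.toNat (PySem.List.pyGetD pref (i - 1) 0 + PySem.List.pyGetD list (i - 1) 0))
      pref0
  -- res = len(list); for i in range(len(list) - D + 1): ...
  (PySem.List.pyRange 0 (n - D + 1) 1).foldl
    (fun res i =>
      let e := i + D - 1
      let curr := PySem.List.pyGetD pref (e + 1) 0 - PySem.List.pyGetD pref i 0
      let before := PySem.List.pyGetD pref i 0
      let after := PySem.List.pyGetD pref n 0 - PySem.List.pyGetD pref (e + 1) 0
      min res (D - curr + before + after))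
    n

-- ===== PORT B =====
-- Literal port of B (Source B): sliding window, state (curr, res).
def opt_dist_alt (list : List Int) (D : Int) : Int :=
  let n : Int := (list.length : Int)
  let total : Int := list.sum
  let res : Int := n
  if D ≤ n then
    let curr : Int := (PySem.List.slice list none (some D)).sum       -- sum(list[:D])
    let res : Int := min res (D + total - 2 * curr)
    let st := (PySem.List.pyRange 1 (n - D + 1) 1).foldl
      (fun (st : Int × Int) i =>
        let curr := st.1 + PySem.List.pyGetD list (i + D - 1) 0 - PySem.List.pyGetD list (i - 1) 0
        (curr, min st.2 (D + total - 2 * curr)))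
      (curr, res)
    st.2
  else res

-- ===== PRECONDITION & SPEC =====
-- Pre_ excludes exactly D < 0, where Python A raises IndexError (pref is indexed past its end).
def Pre_opt_dist (list : List Int) (D : Int) : Prop := 0 ≤ D
instance (list : List Int) (D : Int) : Decidable (Pre_opt_dist list D) := by unfold Pre_opt_dist; infer_instance
def pvWitness_opt_dist : List Int × Int := ([1, 0, 1], 2)

def Spec_opt_dist (list : List Int) (D : Int) (out : Int) : Prop := out = opt_dist_alt list D
instance (list : List Int) (D : Int) (out : Int) : Decidable (Spec_opt_dist list D out) := by unfold Spec_opt_dist; infer_instance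

-- ===== CLAIM (what is proved, stated in full; the proofs are below) =====
def Claim_equal_opt_dist : Prop := ∀ (list : List Int) (D : Int), Dom_opt_dist list D → Pre_opt_dist list D → Spec_opt_dist list D (opt_dist list D)

-- ===== LEMMAS AND PROOFS =====

-- prefix sum of the first k elements
def pvP (l : List Int) (k : Nat) : Int := (l.take k).sum

-- the score of the window starting at i, in B's simplified form
def pvG (l : List Int) (D i : Int) : Int :=
  D + l.sum - 2 * (pvP l (i + D).toNat - pvP l i.toNat)

theorem pvP_succ (l : List Int) (j : Nat) (h : j < l.length) :
    pvP l (j + 1) = pvP l j + l[j] := by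
  simpa [pvP] using List.sum_take_succ l j h

-- A's first loop builds the prefix-sum table (generalized invariant)
theorem pref_build (l : List Int) (j : Nat) (hj : j ≤ l.length) :
    (PySem.List.pyRange 1 ((j : Int) + 1) 1).foldl
      (fun pref i =>
        pref.set i.toNat (PySem.List.pyGetD pref (i - 1) 0 + PySem.List.pyGetD l (i - 1) 0))
      ((List.range (l.length + 1)).map (fun _ => (0 : Int)))
    = (List.range (l.length + 1)).map (fun k => if k ≤ j then pvP l k else 0) := by
  induction j with
  | zero =>
      rw [PySem.List.pyRange_one_eq_nil (by norm_num)]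
      simp only [List.foldl_nil]
      congr 1
      funext k
      cases k <;> simp [pvP]
  | succ j ih =>
      have hj' : j ≤ l.length := by omega
      have hcast : ((j + 1 : Nat) : Int) + 1 = ((j : Int) + 1) + 1 := by push_cast; ring
      rw [hcast, PySem.List.pyRange_one_succ_right (by omega), List.foldl_append, ih hj']
      simp only [List.foldl_cons, List.foldl_nil]
      have h1 : ((j : Int) + 1) - 1 = (j : Int) := by ring
      have h2 : ((j : Int) + 1).toNat = j + 1 := by omega
      rw [h1, h2, PySem.List.pyGetD_natCast, PySem.List.pyGetD_natCast,
          PySem.List.getD_map_range _ _ _ _ (by omega)]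
      have hjlt : j < l.length := by omega
      have hval : (if j ≤ j then pvP l j else 0) + l.getD j 0 = pvP l (j + 1) := by
        rw [if_pos le_rfl, List.getD_eq_getElem l 0 hjlt, ← pvP_succ l j hjlt]
      rw [hval]
      apply List.ext_getElem
      · simp
      · intro k hk1 hk2
        simp only [List.length_set, List.length_map, List.length_range] at hk1
        rw [List.getElem_set]
        by_cases hke : j + 1 = k
        · subst hke; simp
        · rw [if_neg hke]
          simp only [List.getElem_map, List.getElem_range]
          split_ifs <;> first | rfl | omega

-- A's zero table equals the List.range form used by pref_build
theorem pref0_eq (l : List Int) :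
    (PySem.List.pyRange 0 ((l.length : Int) + 1) 1).map (fun _ => (0 : Int))
    = (List.range (l.length + 1)).map (fun _ => (0 : Int)) := by
  rw [PySem.List.pyRange_one, List.map_map]
  have : ((l.length : Int) + 1 - 0).toNat = l.length + 1 := by omega
  rw [this]
  rfl

-- A equals the reference min-fold of pvG over the window starts
theorem opt_dist_eq_ref (l : List Int) (D : Int) (hD : 0 ≤ D) :
    opt_dist l D
    = (PySem.List.pyRange 0 ((l.length : Int) - D + 1) 1).foldl
        (fun r i => min r (pvG l D i)) (l.length : Int) := by
  unfold opt_dist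
  simp only []
  rw [pref0_eq]
  have hb : (PySem.List.pyRange 1 ((l.length : Int) + 1) 1).foldl
      (fun pref i =>
        pref.set i.toNat (PySem.List.pyGetD pref (i - 1) 0 + PySem.List.pyGetD l (i - 1) 0))
      ((List.range (l.length + 1)).map (fun _ => (0 : Int)))
      = (List.range (l.length + 1)).map (fun k => pvP l k) := by
    have := pref_build l l.length le_rfl
    rw [this]
    apply List.map_congr_left
    intro k hk
    rw [List.mem_range] at hk
    rw [if_pos (by omega)]
  rw [hb]
  apply PySem.List.foldl_congr_mem
  intro r i hi
  rw [PySem.List.mem_pyRange_one] at hi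
  obtain ⟨hi0, hi1⟩ := hi
  have hiD : i + D - 1 + 1 = i + D := by ring
  have hne : (l.length : Int) = ((l.length : Nat) : Int) := rfl
  have get_at : ∀ x : Int, 0 ≤ x → x ≤ (l.length : Int) →
      PySem.List.pyGetD ((List.range (l.length + 1)).map (fun k => pvP l k)) x 0
      = pvP l x.toNat := by
    intro x hx0 hx1
    rw [PySem.List.pyGetD_eq_getElem _ _ hx0 (by simp; omega)]
    simp only [List.getElem_map, List.getElem_range]
  rw [hiD, get_at i hi0 (by omega), get_at (i + D) (by omega) (by omega),
      get_at (l.length : Int) (by omega) le_rfl]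
  have hPn : pvP l ((l.length : Int)).toNat = l.sum := by
    simp [pvP]
  rw [hPn]
  unfold pvG
  congr 1
  ring

-- B's sliding loop maintains (window sum, running min) (generalized invariant)
theorem slide (l : List Int) (D : Int) (hD0 : 0 ≤ D) (m : Nat)
    (hm : (m : Int) ≤ (l.length : Int) - D) (r0 : Int) :
    (PySem.List.pyRange 1 ((m : Int) + 1) 1).foldl
      (fun (st : Int × Int) i =>
        let curr := st.1 + PySem.List.pyGetD l (i + D - 1) 0 - PySem.List.pyGetD l (i - 1) 0
        (curr, min st.2 (D + l.sum - 2 * curr)))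
      (pvP l D.toNat, r0)
    = (pvP l (m + D.toNat) - pvP l m,
       (PySem.List.pyRange 1 ((m : Int) + 1) 1).foldl
         (fun r i => min r (pvG l D i)) r0) := by
  induction m generalizing r0 with
  | zero =>
      rw [PySem.List.pyRange_one_eq_nil (by norm_num)]
      simp [pvP]
  | succ m ih =>
      have hm' : (m : Int) ≤ (l.length : Int) - D := by push_cast at hm; omega
      have hcast : ((m + 1 : Nat) : Int) + 1 = ((m : Int) + 1) + 1 := by push_cast; ring
      rw [hcast, PySem.List.pyRange_one_succ_right (by omega), List.foldl_append,
          List.foldl_append, ih hm' r0]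
      simp only [List.foldl_cons, List.foldl_nil]
      have h1 : ((m : Int) + 1) + D - 1 = (m : Int) + D := by ring
      have h2 : ((m : Int) + 1) - 1 = (m : Int) := by ring
      have hmD : m + D.toNat < l.length := by push_cast at hm; omega
      have hml : m < l.length := by push_cast at hm; omega
      rw [h1, h2,
          PySem.List.pyGetD_eq_getElem l _ (by omega) (by push_cast; omega),
          PySem.List.pyGetD_natCast]
      have hidx : ((m : Int) + D).toNat = m + D.toNat := by omega
      have hcurr : pvP l (m + D.toNat) - pvP l m + l[((m : Int) + D).toNat]'(by omega)
          - l.getD m 0 = pvP l (m + 1 + D.toNat) - pvP l (m + 1) := by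
        rw [List.getD_eq_getElem l 0 hml]
        have e1 := pvP_succ l (m + D.toNat) hmD
        have e2 := pvP_succ l m hml
        simp only [hidx]
        have : m + 1 + D.toNat = m + D.toNat + 1 := by omega
        rw [this, e1, e2]
        ring
      rw [hcurr]
      simp only [Prod.mk.injEq, true_and]
      congr 1
      unfold pvG
      have ha : ((m : Int) + 1).toNat = m + 1 := by omega
      have hb : ((m : Int) + 1 + D).toNat = m + 1 + D.toNat := by omega
      rw [ha, hb]

-- ===== VERDICT (by name: the statement is the Claim_ definition above) =====
theorem opt_dist_spec : Claim_equal_opt_dist := by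
  intro l D _ hD
  unfold Spec_opt_dist
  have hD0 : (0 : Int) ≤ D := hD
  by_cases hle : D ≤ (l.length : Int)
  · rw [opt_dist_eq_ref l D hD0]
    unfold opt_dist_alt
    simp only [if_pos hle]
    have hcurr0 : (PySem.List.slice l none (some D)).sum = pvP l D.toNat := by
      rw [PySem.List.slice_to l hD0]; rfl
    rw [hcurr0]
    have hm : (((l.length : Int) - D).toNat : Int) = (l.length : Int) - D := by omega
    have := slide l D hD0 ((l.length : Int) - D).toNat (by omega)
      (min (l.length : Int) (D + l.sum - 2 * pvP l D.toNat))
    rw [hm] at this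
    rw [this]
    rw [PySem.List.pyRange_one_cons (show (0:Int) < (l.length : Int) - D + 1 by omega)]
    simp only [List.foldl_cons, zero_add]
    congr 2
    unfold pvG
    simp [pvP]
  · rw [opt_dist_eq_ref l D hD0]
    unfold opt_dist_alt
    simp only [if_neg hle]
    rw [PySem.List.pyRange_one_eq_nil (by omega)]
    rfl
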